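-- pv_equiv track=rewrite | github.com/mantasjjj/Bioinformatika | Lab1/main.py | find_farthest_codon_for_each_stop_codon
-- ===== SOURCE A (Python) =====
-- def find_farthest_codon_for_each_stop_codon(seq_record):
--     i = 0
--     codon_list = []
--     while i < len(seq_record):
--         if seq_record[i] == 'TAA' or seq_record[i] == 'TAG' or seq_record[i] == 'TGA':
--             start_pos = i
--             j = i + 1
--             end_pos = -1
--             while j < len(seq_record):
--                 if seq_record[j] == 'ATG':
--                     end_pos = j
--                 elif seq_record[j] == 'TAA' or seq_record[j] == 'TAG' or seq_record[j] == 'TGA':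
--                     if end_pos != -1:
--                         codon_list.append(''.join(str(e) for e in seq_record[start_pos:end_pos + 1]))
--                     i = j
--                     break
--                 j += 1
--         i += 1
--     return codon_list
-- ===== SOURCE B (Python) =====
-- def find_farthest_codon_for_each_stop_codon(seq_record):
--     # Different decomposition: collect all stop-codon indices once, consume them
--     # in non-overlapping pairs, and for each pair take the last ATG strictly between.
--     stops = [i for i in range(len(seq_record))
--              if seq_record[i] in ('TAA', 'TAG', 'TGA')]
--     out = []
--     while len(stops) >= 2:
--         s, e = stops[0], stops[1]
--         stops = stops[2:]
--         p = None
--         for q in range(s + 1, e):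
--             if seq_record[q] == 'ATG':
--                 p = q
--         if p is not None:
--             out.append(''.join(seq_record[s:p + 1]))
--     return out
-- ===== Notes on version B (the rewrite author's own statement) =====
-- stated objective: alternative
-- what changed: Replaces A's nested while-loops with index jumping by a two-phase decomposition: first collect all stop-codon indices, then consume them in non-overlapping pairs, scanning each gap for the last ATG.
import Mathlib
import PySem

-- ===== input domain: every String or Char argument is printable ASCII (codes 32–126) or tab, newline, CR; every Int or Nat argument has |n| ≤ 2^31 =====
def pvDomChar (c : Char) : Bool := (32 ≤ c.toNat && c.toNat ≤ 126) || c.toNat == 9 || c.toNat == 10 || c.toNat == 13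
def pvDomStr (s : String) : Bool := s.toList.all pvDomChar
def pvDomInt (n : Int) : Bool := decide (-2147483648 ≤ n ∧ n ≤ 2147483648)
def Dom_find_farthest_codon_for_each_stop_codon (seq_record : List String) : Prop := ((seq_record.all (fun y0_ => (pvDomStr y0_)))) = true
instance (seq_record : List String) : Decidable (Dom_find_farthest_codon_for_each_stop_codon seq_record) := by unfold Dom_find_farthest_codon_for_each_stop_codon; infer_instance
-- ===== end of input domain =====

-- B replaces A's nested while-loops by a two-phase decomposition (collect stop indices,
-- pair them non-overlappingly, scan each gap for the last ATG); same result, same cost.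

-- ===== PORT A =====

def pvIsStop (s : String) : Bool := s == "TAA" || s == "TAG" || s == "TGA"

/-- A's inner `while j < len` loop (fuel-counted, fuel ≥ len - j suffices):
    returns `some (j, end_pos)` on the `break` (a stop codon found at `j`),
    `none` if the loop runs off the end. -/
def pvInnerA (seq : List String) (fuel : Nat) (j : Nat) (endPos : Int) : Option (Nat × Int) :=
  match fuel with
  | 0 => none
  | fuel + 1 =>
    if j < seq.length then
      if seq.getD j "" == "ATG" then pvInnerA seq fuel (j+1) (Int.ofNat j)
      else if pvIsStop (seq.getD j "") then some (j, endPos)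
      else pvInnerA seq fuel (j+1) endPos
    else none

/-- A's outer `while i < len` loop (fuel-counted, fuel ≥ len - i suffices). -/
def pvOuterA (seq : List String) (fuel : Nat) (i : Nat) (acc : List String) : List String :=
  match fuel with
  | 0 => acc
  | fuel + 1 =>
    if i < seq.length then
      if pvIsStop (seq.getD i "") then
        match pvInnerA seq seq.length (i+1) (-1) with
        | some (j, endPos) =>
            pvOuterA seq fuel (j+1)
              (if endPos ≠ -1 then
                 acc ++ [PySem.Str.join "" (PySem.List.slice seq (some (i : Int)) (some (endPos + 1)))]
               else acc)
        | none => pvOuterA seq fuel (i+1) acc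
      else pvOuterA seq fuel (i+1) acc
    else acc

def find_farthest_codon_for_each_stop_codon (seq_record : List String) : List String :=
  pvOuterA seq_record seq_record.length 0 []

-- ===== PORT B =====

/-- B's inner `for q in range(s+1, e)` loop keeping the last ATG index. -/
def pvLastATG (seq : List String) (s e : Nat) : Option Nat :=
  (List.range' (s+1) (e - (s+1))).foldl
    (fun p q => if seq.getD q "" == "ATG" then some q else p) none

/-- B's `while len(stops) >= 2` loop over the collected stop indices. -/
def pvPairsB (seq : List String) (stops : List Nat) (acc : List String) : List String :=
  match stops with
  | s :: e :: rest =>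
      pvPairsB seq rest
        (match pvLastATG seq s e with
         | some p => acc ++ [PySem.Str.join "" (PySem.List.slice seq (some (s : Int)) (some ((p : Int) + 1)))]
         | none => acc)
  | _ => acc

def find_farthest_codon_for_each_stop_codon_alt (seq_record : List String) : List String :=
  pvPairsB seq_record
    ((List.range seq_record.length).filter (fun i => pvIsStop (seq_record.getD i ""))) []

-- ===== PRECONDITION & SPEC =====
def Spec_find_farthest_codon_for_each_stop_codon (seq_record : List String) (out : List String) : Prop := out = find_farthest_codon_for_each_stop_codon_alt seq_record
instance (seq_record : List String) (out : List String) : Decidable (Spec_find_farthest_codon_for_each_stop_codon seq_record out) := by unfold Spec_find_farthest_codon_for_each_stop_codon; infer_instance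

-- ===== CLAIM (what is proved, stated in full; the proofs are below) =====
def Claim_equal_find_farthest_codon_for_each_stop_codon : Prop := ∀ (seq_record : List String), Dom_find_farthest_codon_for_each_stop_codon seq_record → Spec_find_farthest_codon_for_each_stop_codon seq_record (find_farthest_codon_for_each_stop_codon seq_record)

-- ===== LEMMAS AND PROOFS =====

/-- The stop indices of `seq` that are `≥ j`. -/
def pvStopsFrom (seq : List String) (j : Nat) : List Nat :=
  (List.range' j (seq.length - j)).filter (fun i => pvIsStop (seq.getD i ""))

theorem pvStopsFrom_of_ge {seq : List String} {j : Nat} (h : seq.length ≤ j) :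
    pvStopsFrom seq j = [] := by
  unfold pvStopsFrom
  rw [Nat.sub_eq_zero_of_le h]
  rfl

theorem pvStopsFrom_succ {seq : List String} {j : Nat} (h : j < seq.length) :
    pvStopsFrom seq j =
      if pvIsStop (seq.getD j "") then j :: pvStopsFrom seq (j+1) else pvStopsFrom seq (j+1) := by
  unfold pvStopsFrom
  have : seq.length - j = (seq.length - (j+1)) + 1 := by omega
  rw [this, List.range'_succ, List.filter_cons]

theorem pvStopsFrom_mem_bounds {seq : List String} {j t : Nat}
    (h : t ∈ pvStopsFrom seq j) : j ≤ t ∧ t < seq.length := by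
  unfold pvStopsFrom at h
  have := List.mem_range'_1.mp (List.mem_of_mem_filter h)
  omega

theorem pvStopsFrom_tail {seq : List String} {j t : Nat} {rest : List Nat}
    (h : pvStopsFrom seq j = t :: rest) : pvStopsFrom seq (t+1) = rest := by
  induction hn : seq.length - j using Nat.strong_induction_on generalizing j with
  | _ n ih =>
    by_cases hj : j < seq.length
    · rw [pvStopsFrom_succ hj] at h
      split at h
      · cases h; rfl
      · exact ih (seq.length - (j+1)) (by omega) h rfl
    · rw [pvStopsFrom_of_ge (by omega)] at h; cases h

/-- The Int-accumulator fold A's inner loop performs on positions `j, ..., t-1`. -/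
def pvLastIn (seq : List String) (j t : Nat) (e : Int) : Int :=
  (List.range' j (t - j)).foldl
    (fun a q => if seq.getD q "" == "ATG" then (q : Int) else a) e

theorem pvInnerA_eq (seq : List String) (fuel j : Nat) (e : Int)
    (hf : seq.length - j ≤ fuel) :
    pvInnerA seq fuel j e =
      (pvStopsFrom seq j).head?.map (fun t => (t, pvLastIn seq j t e)) := by
  induction fuel generalizing j e with
  | zero =>
    rw [pvStopsFrom_of_ge (by omega)]
    rfl
  | succ fuel ih =>
    rw [pvInnerA]
    by_cases hj : j < seq.length
    · rw [if_pos hj, pvStopsFrom_succ hj]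
      by_cases hATG : (seq.getD j "" == "ATG") = true
      · have hns : pvIsStop (seq.getD j "") = false := by
          rw [pvIsStop, eq_of_beq hATG]; rfl
        rw [if_pos hATG, if_neg (by simpa using hns), ih (j+1) (Int.ofNat j) (by omega)]
        cases hsf : pvStopsFrom seq (j+1) with
        | nil => rfl
        | cons t rest =>
          have ht : j + 1 <= t := (pvStopsFrom_mem_bounds (hsf ▸ List.mem_cons_self)).1
          simp only [List.head?_cons, Option.map_some]
          congr 2
          unfold pvLastIn
          have hsplit : t - j = (t - (j+1)) + 1 := by omega
          rw [hsplit, List.range'_succ, List.foldl_cons, if_pos hATG]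
          rfl
      · rw [if_neg hATG]
        by_cases hst : pvIsStop (seq.getD j "") = true
        · rw [if_pos hst, if_pos hst]
          simp only [List.head?_cons, Option.map_some]
          congr 2
          unfold pvLastIn
          rw [Nat.sub_self]
          rfl
        · rw [if_neg hst, if_neg hst, ih (j+1) e (by omega)]
          cases hsf : pvStopsFrom seq (j+1) with
          | nil => rfl
          | cons t rest =>
            have ht : j + 1 <= t := (pvStopsFrom_mem_bounds (hsf ▸ List.mem_cons_self)).1
            simp only [List.head?_cons, Option.map_some]
            congr 2
            unfold pvLastIn
            have hsplit : t - j = (t - (j+1)) + 1 := by omega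
            rw [hsplit, List.range'_succ, List.foldl_cons, if_neg hATG]
    · rw [if_neg hj, pvStopsFrom_of_ge (by omega)]
      rfl

/-- Bridge between A's `-1`-sentinel Int accumulator and B's Option accumulator. -/
theorem pvFold_int_opt (seq : List String) (l : List Nat) :
    ∀ (e : Int) (o : Option Nat),
      e = (match o with | some p => (p : Int) | none => -1) →
      List.foldl (fun a q => if seq.getD q "" == "ATG" then (q : Int) else a) e l =
        (match List.foldl (fun p q => if seq.getD q "" == "ATG" then some q else p) o l with
         | some p => (p : Int) | none => -1) := by
  induction l with
  | nil => intro e o he; exact he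
  | cons q l ih =>
    intro e o he
    simp only [List.foldl_cons]
    by_cases h : (seq.getD q "" == "ATG") = true
    · rw [if_pos h, if_pos h]; exact ih _ _ rfl
    · rw [if_neg h, if_neg h]; exact ih _ _ he

theorem pvLastIn_eq_pvLastATG (seq : List String) (s t : Nat) :
    pvLastIn seq (s+1) t (-1) =
      (match pvLastATG seq s t with
       | some p => (p : Int)
       | none => -1) := by
  unfold pvLastIn pvLastATG
  exact pvFold_int_opt seq _ _ _ rfl

theorem pvLastATG_ne_neg_one (seq : List String) (s t : Nat) :
    ((match pvLastATG seq s t with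
      | some p => (p : Int)
      | none => -1) ≠ -1) ↔ (pvLastATG seq s t).isSome := by
  cases pvLastATG seq s t with
  | none => simp
  | some p => simp

/-- Main invariant: A's outer loop from `i` computes B's pair loop on the stops ≥ `i`. -/
theorem pvOuterA_eq (seq : List String) (fuel i : Nat) (acc : List String)
    (hf : seq.length - i ≤ fuel) :
    pvOuterA seq fuel i acc = pvPairsB seq (pvStopsFrom seq i) acc := by
  induction fuel generalizing i acc with
  | zero =>
    rw [pvStopsFrom_of_ge (by omega)]
    rfl
  | succ fuel ih =>
    rw [pvOuterA]
    by_cases hi : i < seq.length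
    · rw [if_pos hi]
      by_cases hst : pvIsStop (seq.getD i "") = true
      · rw [if_pos hst, pvStopsFrom_succ hi, if_pos hst]
        rw [pvInnerA_eq seq seq.length (i+1) (-1) (by omega)]
        cases hsf : pvStopsFrom seq (i+1) with
        | nil =>
          simp only [List.head?_nil, Option.map_none]
          rw [ih (i+1) acc (by omega), hsf]
          rfl
        | cons t rest =>
          simp only [List.head?_cons, Option.map_some]
          have hbd := pvStopsFrom_mem_bounds (hsf ▸ List.mem_cons_self (a := t) (l := rest))
          have htt : pvStopsFrom seq (t+1) = rest := pvStopsFrom_tail hsf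
          rw [ih (t+1) _ (by omega), htt]
          show pvPairsB seq rest _ = pvPairsB seq (i :: t :: rest) acc
          rw [pvPairsB]
          congr 1
          rw [pvLastIn_eq_pvLastATG]
          by_cases hp : (pvLastATG seq i t).isSome
          · rw [if_pos ((pvLastATG_ne_neg_one seq i t).mpr hp)]
            obtain ⟨p, hpeq⟩ := Option.isSome_iff_exists.mp hp
            rw [hpeq]
          · rw [if_neg (fun hne => hp ((pvLastATG_ne_neg_one seq i t).mp hne))]
            rw [Option.not_isSome_iff_eq_none.mp hp]
      · rw [if_neg hst, pvStopsFrom_succ hi, if_neg hst, ih (i+1) acc (by omega)]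
    · rw [if_neg hi, pvStopsFrom_of_ge (by omega)]
      rfl

-- ===== VERDICT (by name: the statement is the Claim_ definition above) =====
theorem find_farthest_codon_for_each_stop_codon_spec : Claim_equal_find_farthest_codon_for_each_stop_codon := by
  intro seq _
  unfold Spec_find_farthest_codon_for_each_stop_codon
  unfold find_farthest_codon_for_each_stop_codon find_farthest_codon_for_each_stop_codon_alt
  rw [pvOuterA_eq seq seq.length 0 [] (by omega)]
  congr 1
  unfold pvStopsFrom
  rw [List.range_eq_range']
  congr 2
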